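-- pv_equiv track=rewrite | github.com/Kattusite/ENG385-abc-poetry | find_allit.py | simplifyRhymeScheme
-- ===== SOURCE A (Python) =====
-- def simplifyRhymeScheme(scheme):
--     """Given a list of numbers indicating which rhyme group each of the
--     corresponding words belongs to, simplify the list to its canonical form
--     (i.e. only introduce a new number once all earlier ones exhausted),
--     and convert the numbers to corresponding chars A,B,C,...
--     if the scheme can be expressed in 26 distinct letters or fewer
--
--     Due to some words having multiple pronunciations, our rhymeID counter
--     might end up skipping numbers; e.g rather than [1, 2, 3, 2, 3, 1, 4, 5]
--     we might get:                                  [1, 5, 3, 5, 3, 1, 9, 5]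
--
--     To avoid this, condense the scheme back into the simplest possible
--     representation.
--     """
--
--     if not scheme:
--         return []
--
--     # Simplify the scheme so the max is as small as possible, and
--     # new indices are introduced in ascending order
--     table = {}
--     simplified = []
--     i = 0
--     for val in scheme:
--         if val in table:
--             simplified.append(table[val])
--         else:
--             table[val] = i
--             simplified.append(i)
--             i += 1
--
--     # Try to convert to a nice alphabetical naming for rhyme schemes.
--     # If it's too long just use ugly numbers instead
--     schemeIDs = "ABCDEFGHIJKLMNOPQRSTUVWXYZ"
--
--     if max(simplified) < len(schemeIDs):
--         prettified = [schemeIDs[s]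
--             for s in simplified]     # [1,2,1,2] ==> [A,B,A,B]
--     else:
--         prettified = [str(s) for s in simplified]
--
--     return prettified
-- ===== SOURCE B (Python) =====
-- def simplifyRhymeScheme(scheme):
--     """Alternative algorithm: the canonical index of each entry is the number of
--     distinct values occurring strictly before its FIRST occurrence, computed
--     directly per element; no incremental table is maintained."""
--     schemeIDs = "ABCDEFGHIJKLMNOPQRSTUVWXYZ"
--     letters = len(set(scheme)) <= 26
--     out = []
--     for v in scheme:
--         k = len(set(scheme[:scheme.index(v)]))
--         out.append(schemeIDs[k] if letters else str(k))
--     return out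
-- ===== Notes on version B (the rewrite author's own statement) =====
-- stated objective: alternative
-- what changed: A maintains an incremental value-to-index table over one pass, builds an intermediate integer list, then tests max() and converts in a second pass; B keeps no table at all: it decides letters-vs-numbers once from len(set(scheme)) and computes each element's canonical index directly as the number of distinct values before its first occurrence (len(set(scheme[:scheme.index(v)]))), trading speed for a stateless per-element formula.
import Mathlib
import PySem

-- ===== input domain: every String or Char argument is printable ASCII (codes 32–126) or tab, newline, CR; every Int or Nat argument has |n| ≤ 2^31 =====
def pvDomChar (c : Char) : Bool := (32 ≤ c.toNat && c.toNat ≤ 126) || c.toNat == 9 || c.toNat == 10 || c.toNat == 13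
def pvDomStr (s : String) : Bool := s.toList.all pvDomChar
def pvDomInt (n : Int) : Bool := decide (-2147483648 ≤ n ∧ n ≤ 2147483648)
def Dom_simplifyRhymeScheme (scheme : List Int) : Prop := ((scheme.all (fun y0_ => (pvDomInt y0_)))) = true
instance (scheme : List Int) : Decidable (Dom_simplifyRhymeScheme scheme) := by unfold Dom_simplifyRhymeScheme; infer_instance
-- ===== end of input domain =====

-- B drops A's incremental table/counter pass, max() test and second conversion pass:
-- it computes each element's canonical index directly as the count of distinct values
-- before that element's first occurrence (objective: alternative stateless algorithm; slower, O(n^2)).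


-- ===== PORT A =====
def schemeIDs : String := "ABCDEFGHIJKLMNOPQRSTUVWXYZ"

-- schemeIDs[s] as a 1-char string; Python would raise IndexError on none, which is
-- unreachable where either program uses it (the index is guarded below 26)
def idAt (s : Int) : String :=
  match PySem.Str.pyGet? schemeIDs s with
  | some c => String.ofList [c]
  | none => ""

-- the body of A's for-loop; state = (table, simplified, i); table[val] is total here
-- (getD's default is unreachable: the lookup is guarded by 'val in table')
def aStep (acc : PySem.Dict Int Int × List Int × Int) (val : Int) :
    PySem.Dict Int Int × List Int × Int :=
  if acc.1.contains val then (acc.1, acc.2.1 ++ [acc.1.getD val 0], acc.2.2)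
  else (acc.1.insert val acc.2.2, acc.2.1 ++ [acc.2.2], acc.2.2 + 1)

def simplifyRhymeScheme (scheme : List Int) : List String :=
  if scheme = [] then []
  else
    let st := scheme.foldl aStep (PySem.Dict.empty, [], 0)
    let simplified := st.2.1
    match PySem.List.max? simplified (fun x => x) with
    | none => []   -- unreachable: scheme ≠ [] makes simplified nonempty (max(simplified) in Python)
    | some m =>
      if m < PySem.Str.len schemeIDs then simplified.map idAt
      else simplified.map PySem.Int.toStr

-- ===== PORT B =====
-- Source B's loop body: k = len(set(scheme[:scheme.index(v)])); index? is total here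
-- (v is drawn from scheme, so getD's default 0 is unreachable)
def simplifyRhymeScheme_alt (scheme : List Int) : List String :=
  let letters : Bool := decide (PySem.Set.len (PySem.Set.ofList scheme) ≤ 26)
  scheme.foldl
    (fun out v =>
      let i : Int := (((PySem.List.index? scheme v).getD 0 : Nat) : Int)
      let k : Int := PySem.Set.len (PySem.Set.ofList (PySem.List.slice scheme none (some i)))
      out ++ [if letters then idAt k else PySem.Int.toStr k])
    []

-- ===== PRECONDITION & SPEC =====
def Spec_simplifyRhymeScheme (scheme : List Int) (out : List String) : Prop := out = simplifyRhymeScheme_alt scheme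
instance (scheme : List Int) (out : List String) : Decidable (Spec_simplifyRhymeScheme scheme out) := by unfold Spec_simplifyRhymeScheme; infer_instance

-- ===== CLAIM (what is proved, stated in full; the proofs are below) =====
def Claim_equal_simplifyRhymeScheme : Prop := ∀ (scheme : List Int), Dom_simplifyRhymeScheme scheme → Spec_simplifyRhymeScheme scheme (simplifyRhymeScheme scheme)

-- ===== LEMMAS AND PROOFS =====

theorem update_exists_append (l s : List Int) :
    ∃ t, PySem.Set.update s l = s ++ t := by
  induction l generalizing s with
  | nil => exact ⟨[], by simp [PySem.Set.update]⟩
  | cons x l ih =>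
    by_cases hx : x ∈ s
    · rcases ih s with ⟨t, ht⟩
      refine ⟨t, ?_⟩
      rw [show PySem.Set.update s (x :: l) = PySem.Set.update (PySem.Set.add s x) l from rfl,
        show PySem.Set.add s x = s by simp [PySem.Set.add, hx]]
      exact ht
    · rcases ih (s ++ [x]) with ⟨t, ht⟩
      refine ⟨x :: t, ?_⟩
      rw [show PySem.Set.update s (x :: l) = PySem.Set.update (PySem.Set.add s x) l from rfl,
        show PySem.Set.add s x = s ++ [x] by simp [PySem.Set.add, hx]]
      simpa using ht

theorem idxOf_append_left {v : Int} {s : List Int} (t : List Int) (hv : v ∈ s) :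
    (s ++ t).idxOf v = s.idxOf v := by
  induction s with
  | nil => simp at hv
  | cons x s ih =>
    rcases List.mem_cons.mp hv with h | h
    · simp [h]
    · by_cases hx : x = v
      · simp [hx]
      · simp [hx, ih h]

theorem idxOf_append_self {v : Int} {s : List Int} (hv : v ∉ s) :
    (s ++ [v]).idxOf v = s.length := by
  induction s with
  | nil => simp
  | cons x s ih =>
    have hx : x ≠ v := fun h => hv (h ▸ List.mem_cons_self ..)
    have hv' : v ∉ s := fun h => hv (List.mem_cons_of_mem _ h)
    simp [hx, ih hv']

theorem idxOf_update {v : Int} {s : List Int} (l : List Int) (hv : v ∈ s) :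
    (PySem.Set.update s l).idxOf v = s.idxOf v := by
  rcases update_exists_append l s with ⟨t, ht⟩
  rw [ht, idxOf_append_left t hv]

theorem foldA (rest : List Int) : ∀ (seen : List Int) (table : PySem.Dict Int Int) (out : List Int),
    seen.Nodup →
    (∀ v, table.contains v = decide (v ∈ seen)) →
    (∀ v ∈ seen, table.getD v 0 = (seen.idxOf v : Int)) →
    (rest.foldl aStep (table, out, (seen.length : Int))).2.1
      = out ++ rest.map (fun v => (((PySem.Set.update seen rest).idxOf v : Nat) : Int)) := by
  induction rest with
  | nil => intro seen table out _ _ _; simp [PySem.Set.update]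
  | cons v rest ih =>
    intro seen table out hnd hc hg
    by_cases hv : v ∈ seen
    · have hstep : aStep (table, out, (seen.length : Int)) v
          = (table, out ++ [(seen.idxOf v : Int)], (seen.length : Int)) := by
        simp [aStep, hc v, hv, hg v hv]
      have hupd : PySem.Set.update seen (v :: rest) = PySem.Set.update seen rest := by
        simp [PySem.Set.update, PySem.Set.add, hv]
      rw [List.foldl_cons, hstep, ih seen table _ hnd hc hg, hupd,
        List.map_cons, idxOf_update rest hv]
      simp
    · have hstep : aStep (table, out, (seen.length : Int)) v
          = (table.insert v (seen.length : Int), out ++ [(seen.length : Int)],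
             (seen.length : Int) + 1) := by
        simp [aStep, hc v, hv]
      have hnd' : (seen ++ [v]).Nodup := by
        simp [List.nodup_append, hnd]
        exact fun a ha h => hv (h ▸ ha)
      have hc' : ∀ w, (table.insert v (seen.length : Int)).contains w
          = decide (w ∈ seen ++ [v]) := by
        intro w
        rw [PySem.Dict.contains_insert, hc w]
        by_cases hw : w = v <;> simp [hw, hv]
      have hg' : ∀ w ∈ seen ++ [v], (table.insert v (seen.length : Int)).getD w 0
          = ((seen ++ [v]).idxOf w : Int) := by
        intro w hw
        by_cases hwv : w = v
        · subst hwv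
          rw [PySem.Dict.getD_insert_self, idxOf_append_self hv]
        · have hws : w ∈ seen := by
            rcases List.mem_append.mp hw with h | h
            · exact h
            · exact absurd (List.mem_singleton.mp h) hwv
          rw [PySem.Dict.getD_insert, if_neg hwv, hg w hws, idxOf_append_left [v] hws]
      have hlen : (seen.length : Int) + 1 = ((seen ++ [v]).length : Int) := by
        simp
      have hupd : PySem.Set.update seen (v :: rest) = PySem.Set.update (seen ++ [v]) rest := by
        rw [show PySem.Set.update seen (v :: rest)
            = PySem.Set.update (PySem.Set.add seen v) rest from rfl,
          show PySem.Set.add seen v = seen ++ [v] by simp [PySem.Set.add, hv]]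
      have hvmem : v ∈ seen ++ [v] := List.mem_append.mpr (Or.inr (List.mem_singleton.mpr rfl))
      rw [List.foldl_cons, hstep, hlen, ih (seen ++ [v]) _ _ hnd' hc' hg', hupd,
        List.map_cons, idxOf_update rest hvmem, idxOf_append_self hv]
      simp

theorem simplifiedA (scheme : List Int) :
    (scheme.foldl aStep (PySem.Dict.empty, [], 0)).2.1
      = scheme.map (fun v => (((PySem.List.dedup scheme).idxOf v : Nat) : Int)) := by
  have h := foldA scheme [] PySem.Dict.empty [] (by simp)
    (by intro v; simp [PySem.Dict.contains_empty]) (by intro v hv; simp at hv)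
  simpa [PySem.Set.update, PySem.List.dedup_eq_ofList, PySem.Set.ofList_eq_foldl] using h

theorem maxA (scheme : List Int) {m : Int}
    (hm : PySem.List.max? (scheme.map (fun v => (((PySem.List.dedup scheme).idxOf v : Nat) : Int)))
      (fun x => x) = some m) :
    m = ((PySem.List.dedup scheme).length : Int) - 1 := by
  rcases List.mem_map.mp (PySem.List.max?_mem hm) with ⟨v, hv, hveq⟩
  have hvD : v ∈ PySem.List.dedup scheme := (PySem.List.mem_dedup scheme v).mpr hv
  have hlt : List.idxOf v (PySem.List.dedup scheme) < (PySem.List.dedup scheme).length :=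
    List.idxOf_lt_length_of_mem hvD
  have hD : PySem.List.dedup scheme ≠ [] := fun h => by rw [h] at hvD; simp at hvD
  have h1 : 1 ≤ (PySem.List.dedup scheme).length := List.length_pos_of_ne_nil hD
  set g := (PySem.List.dedup scheme).getLast hD with hgdef
  have hd : g ∈ scheme := (PySem.List.mem_dedup scheme _).mp (List.getLast_mem hD)
  have hnd : ((PySem.List.dedup scheme).dropLast ++ [g]).Nodup := by
    rw [hgdef, List.dropLast_append_getLast hD]; exact PySem.List.nodup_dedup scheme
  have hnotmem : g ∉ (PySem.List.dedup scheme).dropLast := by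
    intro hmem
    rcases List.nodup_append.mp hnd with ⟨-, -, hdisj⟩
    exact hdisj _ hmem _ (List.mem_singleton.mpr rfl) rfl
  have hidxd : List.idxOf g (PySem.List.dedup scheme)
      = (PySem.List.dedup scheme).dropLast.length := by
    conv_lhs => rw [← List.dropLast_append_getLast hD, ← hgdef]
    exact idxOf_append_self hnotmem
  have hmax := PySem.List.max?_isMax hm _ (List.mem_map.mpr ⟨g, hd, rfl⟩)
  rw [hidxd] at hmax
  have hdl : (PySem.List.dedup scheme).dropLast.length = (PySem.List.dedup scheme).length - 1 := by
    simp
  rw [hdl] at hmax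
  omega

-- B's per-element formula equals the first-appearance index: for v ∈ scheme with first
-- occurrence at i, |set(scheme[:i])| = idxOf v (dedup scheme)
theorem prefixCountB {v : Int} {scheme : List Int} {i : Nat}
    (hidx : PySem.List.index? scheme v = some i) :
    (PySem.Set.ofList (scheme.take i)).length = (PySem.List.dedup scheme).idxOf v := by
  rcases (PySem.List.index?_eq_some_iff scheme v i).mp hidx with ⟨pre, suf, hsch, hlen, hvpre⟩
  have htake : scheme.take i = pre := by
    rw [hsch, ← hlen, List.take_left]
  have hvS : v ∉ PySem.Set.ofList pre := fun h => hvpre ((PySem.Set.mem_ofList pre v).mp h)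
  have hded : PySem.List.dedup scheme
      = PySem.Set.update (PySem.Set.ofList pre ++ [v]) suf := by
    rw [hsch, PySem.List.dedup_eq_ofList, PySem.Set.ofList_eq_foldl, List.foldl_append,
      List.foldl_cons]
    rw [show (List.foldl PySem.Set.add [] pre) = PySem.Set.ofList pre from
      (PySem.Set.ofList_eq_foldl pre).symm]
    rw [show PySem.Set.add (PySem.Set.ofList pre) v = PySem.Set.ofList pre ++ [v] by
      simp [PySem.Set.add, hvS]]
    rfl
  rcases update_exists_append suf (PySem.Set.ofList pre ++ [v]) with ⟨t, ht⟩
  have hvmem : v ∈ PySem.Set.ofList pre ++ [v] :=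
    List.mem_append.mpr (Or.inr (List.mem_singleton.mpr rfl))
  rw [htake, hded, ht, idxOf_append_left t hvmem, idxOf_append_self hvS]

-- ===== VERDICT (by name: the statement is the Claim_ definition above) =====
theorem simplifyRhymeScheme_spec : Claim_equal_simplifyRhymeScheme := by
  intro scheme _
  unfold Spec_simplifyRhymeScheme
  simp only [simplifyRhymeScheme, simplifyRhymeScheme_alt]
  rw [PySem.List.foldl_append_singleton_eq_map]
  have hmapB : scheme.map (fun v =>
      let i : Int := (((PySem.List.index? scheme v).getD 0 : Nat) : Int)
      let k : Int := PySem.Set.len (PySem.Set.ofList (PySem.List.slice scheme none (some i)))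
      if decide (PySem.Set.len (PySem.Set.ofList scheme) ≤ 26)
      then idAt k else PySem.Int.toStr k)
      = scheme.map (fun v =>
        if decide (((PySem.List.dedup scheme).length : Int) ≤ 26)
        then idAt (((PySem.List.dedup scheme).idxOf v : Nat) : Int)
        else PySem.Int.toStr (((PySem.List.dedup scheme).idxOf v : Nat) : Int)) := by
    apply List.map_congr_left
    intro v hv
    obtain ⟨i, hi⟩ : ∃ i, PySem.List.index? scheme v = some i := by
      cases h : PySem.List.index? scheme v with
      | none => exact absurd hv ((PySem.List.index?_eq_none_iff scheme v).mp h)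
      | some i => exact ⟨i, rfl⟩
    have hk : PySem.Set.len (PySem.Set.ofList
        (PySem.List.slice scheme none (some (((PySem.List.index? scheme v).getD 0 : Nat) : Int))))
        = (PySem.List.dedup scheme).idxOf v := by
      rw [hi]
      rw [PySem.List.slice_to_natCast]
      have := prefixCountB hi
      simp [PySem.Set.len, this]
    simp only []
    rw [hk]
    simp [PySem.Set.len, PySem.List.dedup_eq_ofList]
  rw [hmapB]
  by_cases hne : scheme = []
  · subst hne; simp
  · have hD : PySem.List.dedup scheme ≠ [] := by
      intro h
      rcases List.exists_mem_of_ne_nil scheme hne with ⟨x, hx⟩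
      have hxd := (PySem.List.mem_dedup scheme x).mpr hx
      rw [h] at hxd
      simp at hxd
    have h1 : 1 ≤ (PySem.List.dedup scheme).length := List.length_pos_of_ne_nil hD
    have hlenI : PySem.Str.len schemeIDs = 26 := by decide
    rw [if_neg hne, simplifiedA scheme]
    obtain ⟨m, hopt⟩ : ∃ m, PySem.List.max?
        (scheme.map fun v => (((PySem.List.dedup scheme).idxOf v : Nat) : Int)) (fun x => x)
          = some m := by
      cases hopt2 : PySem.List.max?
          (scheme.map fun v => (((PySem.List.dedup scheme).idxOf v : Nat) : Int)) (fun x => x)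
        with
      | none => exact absurd (List.map_eq_nil_iff.mp ((PySem.List.max?_eq_none_iff _ _).mp hopt2)) hne
      | some m => exact ⟨m, rfl⟩
    simp only [hopt]
    have hmval := maxA scheme hopt
    by_cases hle : ((PySem.List.dedup scheme).length : Int) ≤ 26
    · rw [if_pos (by rw [hlenI, hmval]; omega : m < PySem.Str.len schemeIDs), List.map_map]
      apply List.map_congr_left
      intro v hv
      rw [PySem.List.dedup_eq_ofList] at hle
      simp
      intro hcon
      omega
    · rw [if_neg (by rw [hlenI, hmval]; omega : ¬ m < PySem.Str.len schemeIDs), List.map_map]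
      apply List.map_congr_left
      intro v hv
      rw [PySem.List.dedup_eq_ofList] at hle
      simp
      intro hcon
      omega
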